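-- pv_equiv track=rewrite | github.com/DrBugKiller/offer | 网易有道.py | getDistanceSum
-- ===== SOURCE A (Python) =====
-- def getDistanceSum(n,nums):
--     res=0
--     if n<2:
--         return 0
--     for i in range(0,n-1):
--         for j in range(i+1,n):
--             if nums[i]>nums[j]:
--                 res+=(j-i)
--     return res
-- ===== SOURCE B (Python) =====
-- def getDistanceSum(n, nums):
--     # One left-to-right pass: group earlier elements by value, keeping per value
--     # a (count, index-sum) aggregate; each new index j adds j*count - index_sum
--     # for every group of a strictly larger value (closed form for sum of (j-i)).
--     if n < 2:
--         return 0
--     res = 0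
--     groups = []  # [value, count, index_sum] per distinct value, first-seen order
--     for j in range(n):
--         v = nums[j]
--         found = False
--         for g in groups:
--             w = g[0]
--             if w > v:
--                 res += j * g[1] - g[2]
--             if w == v:
--                 g[1] += 1
--                 g[2] += j
--                 found = True
--         if not found:
--             groups.append([v, 1, j])
--     return res
-- ===== Notes on version B (the rewrite author's own statement) =====
-- stated objective: alternative
-- what changed: A's nested loop over all index pairs is replaced by a single left-to-right pass that groups earlier elements by value, keeping a (count, index-sum) aggregate per distinct value and adding j*count - index_sum for each group of a strictly larger value, so the inner work scans distinct-value groups instead of all earlier indices.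
import Mathlib
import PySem

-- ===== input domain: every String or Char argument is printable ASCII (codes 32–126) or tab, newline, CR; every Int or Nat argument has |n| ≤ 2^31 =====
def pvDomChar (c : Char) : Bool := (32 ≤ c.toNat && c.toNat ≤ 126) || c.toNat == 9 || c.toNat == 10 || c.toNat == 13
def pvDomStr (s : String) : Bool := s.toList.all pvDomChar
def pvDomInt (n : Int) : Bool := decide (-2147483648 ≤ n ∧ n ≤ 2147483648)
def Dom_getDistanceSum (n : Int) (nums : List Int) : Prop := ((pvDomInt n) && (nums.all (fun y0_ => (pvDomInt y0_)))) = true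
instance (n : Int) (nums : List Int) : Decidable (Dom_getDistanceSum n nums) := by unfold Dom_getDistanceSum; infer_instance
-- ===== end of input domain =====

-- B replaces A's quadratic pair loop by one left-to-right pass over per-value (count, index-sum)
-- aggregates, adding j*count - index_sum per strictly larger earlier value group (objective: alternative).


-- ===== PORT A =====
def getDistanceSum (n : Int) (nums : List Int) : Int :=
  if n < 2 then 0
  else
    (PySem.List.pyRange 0 (n - 1) 1).foldl (fun res i =>
      (PySem.List.pyRange (i + 1) n 1).foldl (fun res j =>
        if PySem.List.pyGetD nums i 0 > PySem.List.pyGetD nums j 0 then res + (j - i)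
        else res) res) 0

-- ===== PORT B =====
-- inner 'for g in groups' loop of Source B: thread res, rebuild the (possibly updated) group list,
-- report whether the value's group was found
def altScan (j v : Int) (res : Int) : List (Int × Int × Int) → Int × List (Int × Int × Int) × Bool
  | [] => (res, [], false)
  | (w, c, s) :: rest =>
    let res1 := if w > v then res + (j * c - s) else res
    if w == v then
      let (r2, rest2, _) := altScan j v res1 rest
      (r2, (w, c + 1, s + j) :: rest2, true)
    else
      let (r2, rest2, f2) := altScan j v res1 rest
      (r2, (w, c, s) :: rest2, f2)

def getDistanceSum_alt (n : Int) (nums : List Int) : Int :=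
  if n < 2 then 0
  else
    ((PySem.List.pyRange 0 n 1).foldl (fun st j =>
      let v := PySem.List.pyGetD nums j 0
      let (res, gs, found) := altScan j v st.1 st.2
      if found then (res, gs) else (res, gs ++ [(v, 1, j)])) ((0 : Int), ([] : List (Int × Int × Int)))).1

-- ===== PRECONDITION & SPEC =====
-- Pre_ excludes exactly the inputs where Python A raises IndexError: n ≥ 2 with n > len(nums).
def Pre_getDistanceSum (n : Int) (nums : List Int) : Prop := n < 2 ∨ n ≤ nums.length
instance (n : Int) (nums : List Int) : Decidable (Pre_getDistanceSum n nums) := by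
  unfold Pre_getDistanceSum; infer_instance
def pvWitness_getDistanceSum : Int × List Int := (4, [3, 1, 3, 2])

def Spec_getDistanceSum (n : Int) (nums : List Int) (out : Int) : Prop := out = getDistanceSum_alt n nums
instance (n : Int) (nums : List Int) (out : Int) : Decidable (Spec_getDistanceSum n nums out) := by
  unfold Spec_getDistanceSum; infer_instance

-- ===== CLAIM (what is proved, stated in full; the proofs are below) =====
def Claim_equal_getDistanceSum : Prop := ∀ (n : Int) (nums : List Int), Dom_getDistanceSum n nums → Pre_getDistanceSum n nums → Spec_getDistanceSum n nums (getDistanceSum n nums)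

-- ===== LEMMAS AND PROOFS =====

-- the pairwise contribution and the common column/total specification
def pvF (nums : List Int) (i j : Int) : Int :=
  if PySem.List.pyGetD nums i 0 > PySem.List.pyGetD nums j 0 then j - i else 0

def pvCol (nums : List Int) (m : Int) : Int :=
  ((PySem.List.pyRange 0 m 1).map (fun i => pvF nums i m)).sum

def pvT (nums : List Int) (k : Int) : Int :=
  ((PySem.List.pyRange 0 k 1).map (pvCol nums)).sum

-- per-value aggregates of a list of (index, value) pairs
def pvCnt (P : List (Int × Int)) (w : Int) : Int := ((P.filter (fun p => p.2 == w)).length : Int)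
def pvIsum (P : List (Int × Int)) (w : Int) : Int := ((P.filter (fun p => p.2 == w)).map (·.1)).sum
def pvEntry (P : List (Int × Int)) (w : Int) : Int × Int × Int := (w, pvCnt P w, pvIsum P w)
def pvP (nums : List Int) (m : Int) : List (Int × Int) :=
  (PySem.List.pyRange 0 m 1).map (fun i => (i, PySem.List.pyGetD nums i 0))

lemma foldl_ite_add {α : Type} (l : List α) (c : α → Prop) [DecidablePred c] (g : α → Int) (r : Int) :
    l.foldl (fun r x => if c x then r + g x else r) r
      = r + (l.map (fun x => if c x then g x else 0)).sum := by
  induction l generalizing r with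
  | nil => simp
  | cons x l ih => simp only [List.foldl_cons, List.map_cons, List.sum_cons, ih]; split_ifs <;> ring_nf

lemma sum_map_partition {α : Type} (P : List α) (c : α → Bool) (g : α → Int) :
    (P.map g).sum = ((P.filter c).map g).sum + ((P.filter (fun p => !(c p))).map g).sum := by
  induction P with
  | nil => simp
  | cons p P ih => by_cases h : c p <;> simp [h, ih] <;> ring

lemma pvCnt_append (P : List (Int × Int)) (j v w : Int) :
    pvCnt (P ++ [(j, v)]) w = pvCnt P w + if v = w then 1 else 0 := by
  simp only [pvCnt, List.filter_append]
  by_cases h : v = w <;> simp [h]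

lemma pvIsum_append (P : List (Int × Int)) (j v w : Int) :
    pvIsum (P ++ [(j, v)]) w = pvIsum P w + if v = w then j else 0 := by
  simp only [pvIsum, List.filter_append]
  by_cases h : v = w <;> simp [h]

lemma pvCnt_zero (P : List (Int × Int)) (v : Int) (h : ∀ p ∈ P, p.2 ≠ v) : pvCnt P v = 0 := by
  simp only [pvCnt]
  rw [List.filter_eq_nil_iff.mpr (by intro p hp; simpa using h p hp)]
  simp

lemma pvIsum_zero (P : List (Int × Int)) (v : Int) (h : ∀ p ∈ P, p.2 ≠ v) : pvIsum P v = 0 := by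
  simp only [pvIsum]
  rw [List.filter_eq_nil_iff.mpr (by intro p hp; simpa using h p hp)]
  simp

lemma scan_eq (j v : Int) (P : List (Int × Int)) (ks : List Int) : ∀ res : Int,
    altScan j v res (ks.map (pvEntry P)) =
      (res + (ks.map (fun w => if v < w then j * pvCnt P w - pvIsum P w else 0)).sum,
       ks.map (pvEntry (P ++ [(j, v)])), ks.contains v) := by
  induction ks with
  | nil => intro res; simp [altScan]
  | cons w ks ih =>
    intro res
    simp only [List.map_cons, pvEntry, altScan, List.sum_cons, ih]
    by_cases hw : w = v
    · subst hw
      simp [pvCnt_append, pvIsum_append, pvEntry, lt_irrefl] <;> split_ifs <;> ring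
    · have hne : (w == v) = false := by simp [hw]
      simp [hne, pvCnt_append, pvIsum_append, pvEntry, Ne.symm hw] <;> split_ifs <;> ring

lemma fiber_const (j v k : Int) (P1 : List (Int × Int)) (h : ∀ p ∈ P1, p.2 = k) :
    (P1.map (fun p => if v < p.2 then j - p.1 else 0)).sum
      = if v < k then j * (P1.length : Int) - (P1.map (·.1)).sum else 0 := by
  induction P1 with
  | nil => simp
  | cons p P1 ih =>
    have hp : p.2 = k := h p (by simp)
    have ihh := ih (fun q hq => h q (by simp [hq]))
    simp only [List.map_cons, List.sum_cons, ihh, hp, List.length_cons]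
    split_ifs <;> push_cast <;> ring

lemma fiber_sum (j v : Int) (P : List (Int × Int)) (ks : List Int)
    (hnd : ks.Nodup) (hcov : ∀ p ∈ P, p.2 ∈ ks) :
    (ks.map (fun w => if v < w then j * pvCnt P w - pvIsum P w else 0)).sum
      = (P.map (fun p => if v < p.2 then j - p.1 else 0)).sum := by
  induction ks generalizing P with
  | nil =>
    cases P with
    | nil => simp
    | cons p P => exact absurd (hcov p (by simp)) (by simp)
  | cons k ks ih =>
    rw [List.nodup_cons] at hnd
    obtain ⟨hk, hnds⟩ := hnd
    have hsplit := sum_map_partition P (fun p => p.2 == k) (fun p => if v < p.2 then j - p.1 else 0)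
    have h1 : ((P.filter (fun p => p.2 == k)).map (fun p => if v < p.2 then j - p.1 else 0)).sum
        = if v < k then j * pvCnt P k - pvIsum P k else 0 := by
      rw [fiber_const j v k _ (by intro p hp; simpa using (List.of_mem_filter hp))]
      simp only [pvCnt, pvIsum]
    have hcov2 : ∀ p ∈ P.filter (fun p => !(p.2 == k)), p.2 ∈ ks := by
      intro p hp
      have hm := List.mem_of_mem_filter hp
      have hne : p.2 ≠ k := by simpa using (List.of_mem_filter hp)
      have h3 := hcov p hm
      simp only [List.mem_cons] at h3
      tauto
    have hsame : ∀ w ∈ ks, pvCnt (P.filter (fun p => !(p.2 == k))) w = pvCnt P w ∧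
        pvIsum (P.filter (fun p => !(p.2 == k))) w = pvIsum P w := by
      intro w hw
      have hwk : w ≠ k := fun e => hk (e ▸ hw)
      have hfilt : (P.filter (fun p => !(p.2 == k))).filter (fun p => p.2 == w)
          = P.filter (fun p => p.2 == w) := by
        rw [List.filter_filter]
        apply List.filter_congr
        intro p _
        by_cases h : p.2 = w
        · simp [h, hwk]
        · simp [h]
      exact ⟨by simp only [pvCnt, hfilt], by simp only [pvIsum, hfilt]⟩
    have h2 : ((ks.map (fun w => if v < w then j * pvCnt P w - pvIsum P w else 0))).sum
        = ((P.filter (fun p => !(p.2 == k))).map (fun p => if v < p.2 then j - p.1 else 0)).sum := by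
      rw [← ih _ hnds hcov2]
      apply congrArg
      apply List.map_congr_left
      intro w hw
      rw [(hsame w hw).1, (hsame w hw).2]
    rw [List.map_cons, List.sum_cons, h2, hsplit, h1]

lemma pvP_succ (nums : List Int) (n : Int) (hn : 0 ≤ n) :
    pvP nums (n + 1) = pvP nums n ++ [(n, PySem.List.pyGetD nums n 0)] := by
  simp only [pvP]
  rw [PySem.List.pyRange_one_succ_right hn, List.map_append]
  simp

lemma pvT_succ (nums : List Int) (n : Int) (hn : 0 ≤ n) :
    pvT nums (n + 1) = pvT nums n + pvCol nums n := by
  simp only [pvT]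
  rw [PySem.List.pyRange_one_succ_right hn, List.map_append]
  simp

lemma colS_eq (nums : List Int) (n : Int) :
    ((pvP nums n).map (fun p => if PySem.List.pyGetD nums n 0 < p.2 then n - p.1 else 0)).sum
      = pvCol nums n := by
  simp only [pvP, pvCol, List.map_map, pvF]
  rfl

lemma alt_loop_inv (nums : List Int) : ∀ m : Int, 0 ≤ m →
    ∃ ks : List Int, ks.Nodup ∧ (∀ p ∈ pvP nums m, p.2 ∈ ks) ∧
      (PySem.List.pyRange 0 m 1).foldl (fun st j =>
        let v := PySem.List.pyGetD nums j 0
        let (res, gs, found) := altScan j v st.1 st.2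
        if found then (res, gs) else (res, gs ++ [(v, 1, j)])) ((0 : Int), ([] : List (Int × Int × Int)))
        = (pvT nums m, ks.map (pvEntry (pvP nums m))) := by
  intro m hm
  induction m, hm using Int.le_induction with
  | base =>
    refine ⟨[], by simp, by simp [pvP], ?_⟩
    simp [PySem.List.pyRange_one_eq_nil, pvT]
  | succ n hn ih =>
    obtain ⟨ks, hnd, hcov, hfold⟩ := ih
    set v := PySem.List.pyGetD nums n 0 with hv
    rw [PySem.List.pyRange_one_succ_right hn]
    rw [List.foldl_append, hfold]
    simp only [List.foldl_cons, List.foldl_nil]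
    rw [scan_eq n v (pvP nums n) ks (pvT nums n)]
    have hcolS : (ks.map (fun w => if v < w then n * pvCnt (pvP nums n) w - pvIsum (pvP nums n) w else 0)).sum
        = pvCol nums n := by
      rw [fiber_sum n v (pvP nums n) ks hnd hcov, colS_eq]
    by_cases hmem : v ∈ ks
    · have hc : ks.contains v = true := by simpa using hmem
      refine ⟨ks, hnd, ?_, ?_⟩
      · intro p hp
        rw [pvP_succ nums n hn] at hp
        rcases List.mem_append.mp hp with h | h
        · exact hcov p h
        · rw [List.mem_singleton.mp h]; exact hmem
      · simp only [hc, if_true, hcolS]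
        rw [pvT_succ nums n hn, pvP_succ nums n hn]
    · have hc : ks.contains v = false := by simpa using hmem
      refine ⟨ks ++ [v],
        by simp [List.nodup_append, hnd]; intro a ha e; exact hmem (e ▸ ha), ?_, ?_⟩
      · intro p hp
        rw [pvP_succ nums n hn] at hp
        rcases List.mem_append.mp hp with h | h
        · simp [hcov p h]
        · rw [List.mem_singleton.mp h]; simp; exact Or.inr hv.symm
      · simp only [hc, Bool.false_eq_true, if_false, hcolS]
        rw [pvT_succ nums n hn, pvP_succ nums n hn, List.map_append]
        have hfresh : ∀ p ∈ pvP nums n, p.2 ≠ v := by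
          intro p hp he
          exact hmem (he ▸ hcov p hp)
        have hent : pvEntry (pvP nums n ++ [(n, v)]) v = (v, 1, n) := by
          simp only [pvEntry, pvCnt_append, pvIsum_append,
            pvCnt_zero (pvP nums n) v hfresh, pvIsum_zero (pvP nums n) v hfresh]
          norm_num
      -- entries of old keys are unchanged by appending the fresh pair
        have hold : ks.map (pvEntry (pvP nums n ++ [(n, v)])) = ks.map (pvEntry (pvP nums n)) := by
          apply List.map_congr_left
          intro w hw
          have hwv : v ≠ w := fun e => hmem (e ▸ hw)
          simp [pvEntry, pvCnt_append, pvIsum_append, hwv]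
        rw [hold, List.map_singleton, hent]

lemma a_sum_eq (nums : List Int) : ∀ n : Int, 1 ≤ n →
    ((PySem.List.pyRange 0 (n - 1) 1).map (fun i =>
      ((PySem.List.pyRange (i + 1) n 1).map (fun j => pvF nums i j)).sum)).sum = pvT nums n := by
  intro n hn
  induction n, hn using Int.le_induction with
  | base =>
    rw [show (1 : Int) - 1 = 0 from rfl, PySem.List.pyRange_one_eq_nil (le_refl 0)]
    simp only [pvT]
    rw [PySem.List.pyRange_one_cons (by norm_num : (0 : Int) < 1),
      PySem.List.pyRange_one_eq_nil (by norm_num : (1 : Int) ≤ 0 + 1)]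
    simp [pvCol, PySem.List.pyRange_one_eq_nil]
  | succ n hn ih =>
    have h0 : (0 : Int) ≤ n - 1 := by omega
    rw [show n + 1 - 1 = (n - 1) + 1 by ring, PySem.List.pyRange_one_succ_right h0,
      List.map_append, List.sum_append]
    have hinner : ∀ i : Int, i + 1 ≤ n →
        ((PySem.List.pyRange (i + 1) (n + 1) 1).map (fun j => pvF nums i j)).sum
          = ((PySem.List.pyRange (i + 1) n 1).map (fun j => pvF nums i j)).sum + pvF nums i n := by
      intro i hi
      rw [PySem.List.pyRange_one_succ_right hi, List.map_append, List.sum_append]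
      simp
    have hmap : (PySem.List.pyRange 0 (n - 1) 1).map (fun i =>
          ((PySem.List.pyRange (i + 1) (n + 1) 1).map (fun j => pvF nums i j)).sum)
        = (PySem.List.pyRange 0 (n - 1) 1).map (fun i =>
          ((PySem.List.pyRange (i + 1) n 1).map (fun j => pvF nums i j)).sum + pvF nums i n) := by
      apply List.map_congr_left
      intro i hi
      have := (PySem.List.mem_pyRange_one.mp hi)
      exact hinner i (by omega)
    rw [hmap, PySem.List.sum_map_add_int, ih]
    have hlast : ((PySem.List.pyRange (n - 1 + 1) (n + 1) 1).map (fun j => pvF nums (n - 1) j)).sum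
        = pvF nums (n - 1) n := by
      rw [show n - 1 + 1 = n by ring, PySem.List.pyRange_one_singleton]
      simp
    rw [List.map_singleton, List.sum_singleton, hlast]
    have hcoln : pvCol nums n
        = ((PySem.List.pyRange 0 (n - 1) 1).map (fun i => pvF nums i n)).sum + pvF nums (n - 1) n := by
      simp only [pvCol]
      rw [show n = (n - 1) + 1 by ring, PySem.List.pyRange_one_succ_right h0,
        List.map_append, List.sum_append]
      simp [show n - 1 + 1 = n by ring]
    rw [pvT_succ nums n (by omega), hcoln]
    ring

-- ===== VERDICT (by name: the statement is the Claim_ definition above) =====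
theorem getDistanceSum_spec : Claim_equal_getDistanceSum := by
  intro n nums _ _
  unfold Spec_getDistanceSum getDistanceSum getDistanceSum_alt
  by_cases h : n < 2
  · simp [h]
  · simp only [h, if_false]
    obtain ⟨ks, _, _, hB⟩ := alt_loop_inv nums n (by omega)
    rw [hB]
    have hA : ∀ i res : Int, (PySem.List.pyRange (i + 1) n 1).foldl (fun res j =>
        if PySem.List.pyGetD nums i 0 > PySem.List.pyGetD nums j 0 then res + (j - i) else res) res
        = res + ((PySem.List.pyRange (i + 1) n 1).map (fun j => pvF nums i j)).sum := by
      intro i res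
      rw [foldl_ite_add]
      rfl
    simp only [hA]
    rw [PySem.List.foldl_add]
    rw [a_sum_eq nums n (by omega)]
    simp
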